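-- pv_equiv track=rewrite | github.com/ParmpalSinghGill/TweetBot | Dataprocessing.py | replcaeHashtag
-- ===== SOURCE A (Python) =====
-- def combineCapitalSingle(words):
-- 	combinedWords=[]
-- 	comword=""
-- 	for word in words:
-- 		if len(word)>1 or (len(word)==1 and not 65<=ord(word)<=90 and not 48<=ord(word)<=57 ) :
-- 			if len(comword)>0:
-- 				combinedWords.append(comword)
-- 				comword=""
-- 			combinedWords.append(word)
-- 		else:
-- 			comword+=word
-- 	if len(comword) > 0:
-- 		combinedWords.append(comword)
-- 	return combinedWords
--
-- def dividehashTag(hasgtag):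
-- 	hasgtag=hasgtag.replace("_"," ")
-- 	allwords=[]
-- 	currentword=""
-- 	for ch in hasgtag:
-- 		if (65<=ord(ch)<=90 or 48<=ord(ch)<=57 or ch==" ") and len(currentword)>0:
-- 			allwords.append(currentword)
-- 			currentword=""
-- 		if ch!=" ":
-- 			currentword+=ch
-- 	allwords.append(currentword)
-- 	allwords=combineCapitalSingle(allwords)
-- 	hasgtag=(" ".join(allwords))
-- 	return hasgtag
--
-- def replcaeHashtag(sentence):
-- 	if "#" in sentence:
-- 		sentence1,sentence2=sentence.split("#",1)
-- 		sentences=sentence2.strip().split(" ",1)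
-- 		if len(sentences)==1:
-- 			hastag=dividehashTag(sentences[0])
-- 			return sentence1.strip()+" "+hastag,[0]*len(sentence1.split())+[1]*len(hastag.split())
-- 		else:
-- 			hasgtag,sentence2=sentence2.split(" ",1)
-- 			sentence1+dividehashTag(sentences[0])
-- 			hashtag,(sentence2,mask)=dividehashTag(hasgtag),replcaeHashtag(sentence2)
-- 			return sentence1.strip() +" "+ hashtag + " " + sentence2,[0]*len(sentence1.split())+[1]*len(hashtag.split())+mask
--
-- 	return sentence.strip(),[0]*len(sentence.split())
-- ===== SOURCE B (Python) =====
-- def combineCapitalSingle(words):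
-- 	combinedWords=[]
-- 	comword=""
-- 	for word in words:
-- 		if len(word)>1 or (len(word)==1 and not 65<=ord(word)<=90 and not 48<=ord(word)<=57 ) :
-- 			if len(comword)>0:
-- 				combinedWords.append(comword)
-- 				comword=""
-- 			combinedWords.append(word)
-- 		else:
-- 			comword+=word
-- 	if len(comword) > 0:
-- 		combinedWords.append(comword)
-- 	return combinedWords
--
-- def dividehashTag(hasgtag):
-- 	hasgtag=hasgtag.replace("_"," ")
-- 	allwords=[]
-- 	currentword=""
-- 	for ch in hasgtag:
-- 		if (65<=ord(ch)<=90 or 48<=ord(ch)<=57 or ch==" ") and len(currentword)>0: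
-- 			allwords.append(currentword)
-- 			currentword=""
-- 		if ch!=" ":
-- 			currentword+=ch
-- 	allwords.append(currentword)
-- 	return " ".join(combineCapitalSingle(allwords))
--
-- def replcaeHashtag(sentence):
-- 	frags=[]
-- 	mask=[]
-- 	remaining=sentence
-- 	while "#" in remaining:
-- 		prefix,rest=remaining.split("#",1)
-- 		sentences=rest.strip().split(" ",1)
-- 		frags.append(prefix.strip())
-- 		mask+=[0]*len(prefix.split())
-- 		if len(sentences)==1:
-- 			tag=dividehashTag(sentences[0])
-- 			frags.append(tag)
-- 			mask+=[1]*len(tag.split())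
-- 			return " ".join(frags),mask
-- 		word,remaining=rest.split(" ",1)
-- 		tag=dividehashTag(word)
-- 		frags.append(tag)
-- 		mask+=[1]*len(tag.split())
-- 	frags.append(remaining.strip())
-- 	mask+=[0]*len(remaining.split())
-- 	return " ".join(frags),mask
-- ===== Notes on version B (the rewrite author's own statement) =====
-- stated objective: simpler
-- what changed: A's self-recursion on the remainder after each hashtag is replaced by a single explicit while-loop that accumulates output fragments and the mask and joins the fragments once at the end.
import Mathlib
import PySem

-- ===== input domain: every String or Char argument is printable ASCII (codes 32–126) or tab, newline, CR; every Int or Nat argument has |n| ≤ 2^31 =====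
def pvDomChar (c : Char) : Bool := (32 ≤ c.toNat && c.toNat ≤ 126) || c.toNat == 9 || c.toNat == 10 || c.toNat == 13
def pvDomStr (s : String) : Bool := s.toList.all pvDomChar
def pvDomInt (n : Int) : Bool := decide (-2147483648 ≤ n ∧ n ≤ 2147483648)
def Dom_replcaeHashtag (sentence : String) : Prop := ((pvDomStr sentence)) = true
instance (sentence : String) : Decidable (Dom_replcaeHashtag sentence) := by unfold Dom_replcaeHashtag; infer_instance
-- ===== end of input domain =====

-- B replaces A's recursion by an explicit while-loop that accumulates output fragments and the
-- mask and joins the fragments once at the end (objective: simpler decomposition; same cost).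

-- ===== PORT A =====
-- shared helpers (identical Python code in A and B): combineCapitalSingle, dividehashTag
def combineCSStep (acc : List (List Char) × List Char) (word : List Char) :
    List (List Char) × List Char :=
  let combined := acc.1
  let comword := acc.2
  let c := word.headD ' '
  if word.length > 1 ||
      (word.length == 1 && !(65 ≤ c.toNat && c.toNat ≤ 90) && !(48 ≤ c.toNat && c.toNat ≤ 57)) then
    if comword.length > 0 then (combined ++ [comword] ++ [word], [])
    else (combined ++ [word], comword)
  else (combined, comword ++ word)

def combineCapitalSingle (words : List (List Char)) : List (List Char) :=
  let r := words.foldl combineCSStep ([], [])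
  if r.2.length > 0 then r.1 ++ [r.2] else r.1

def divideHTStep (acc : List (List Char) × List Char) (ch : Char) :
    List (List Char) × List Char :=
  let acc :=
    if ((65 ≤ ch.toNat && ch.toNat ≤ 90) || (48 ≤ ch.toNat && ch.toNat ≤ 57) || ch == ' ')
        && acc.2.length > 0 then (acc.1 ++ [acc.2], ([] : List Char))
    else acc
  if ch != ' ' then (acc.1, acc.2 ++ [ch]) else acc

def dividehashTag (hasgtag : List Char) : List Char :=
  let h := PySem.Chars.replace hasgtag ['_'] [' ']
  let r := h.foldl divideHTStep ([], [])
  PySem.Chars.join [' '] (combineCapitalSingle (r.1 ++ [r.2]))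

-- the recursion of A; the fuel guard only makes the recursion structural (fuel = length+1 always
-- suffices, the recursive call's argument is a strict suffix past '#' and a space); the fuel-0
-- value mirrors the no-'#' return
def replcaeHashtagRec (fuel : Nat) (sentence : List Char) : List Char × List Int :=
  match fuel with
  | 0 => (PySem.Chars.strip sentence, List.replicate (PySem.Chars.split₀ sentence).length 0)
  | fuel + 1 =>
    if PySem.Chars.isIn ['#'] sentence then
      let parts := PySem.Chars.splitOnMax sentence ['#'] 1
      let sentence1 := parts.getD 0 []
      let sentence2 := parts.getD 1 []
      let sentences := PySem.Chars.splitOnMax (PySem.Chars.strip sentence2) [' '] 1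
      if sentences.length == 1 then
        let hastag := dividehashTag (sentences.getD 0 [])
        (PySem.Chars.strip sentence1 ++ [' '] ++ hastag,
         List.replicate (PySem.Chars.split₀ sentence1).length 0 ++
           List.replicate (PySem.Chars.split₀ hastag).length 1)
      else
        let parts2 := PySem.Chars.splitOnMax sentence2 [' '] 1
        -- Python's `sentence1+dividehashTag(sentences[0])` discards its value; no effect
        let hashtag := dividehashTag (parts2.getD 0 [])
        let r := replcaeHashtagRec fuel (parts2.getD 1 [])
        (PySem.Chars.strip sentence1 ++ [' '] ++ hashtag ++ [' '] ++ r.1,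
         List.replicate (PySem.Chars.split₀ sentence1).length 0 ++
           List.replicate (PySem.Chars.split₀ hashtag).length 1 ++ r.2)
    else (PySem.Chars.strip sentence, List.replicate (PySem.Chars.split₀ sentence).length 0)

def replcaeHashtag (sentence : String) : String × List Int :=
  let r := replcaeHashtagRec (sentence.toList.length + 1) sentence.toList
  (String.ofList r.1, r.2)

-- ===== PORT B =====
-- the while-loop of B: `frags`/`mask` are the accumulated fragments and mask, `remaining` the rest
-- of the sentence (fuel = length+1 always suffices; fuel-0 mirrors the loop-exit code)
def replcaeHashtagLoop (fuel : Nat) (frags : List (List Char)) (mask : List Int)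
    (remaining : List Char) : List Char × List Int :=
  match fuel with
  | 0 => (PySem.Chars.join [' '] (frags ++ [PySem.Chars.strip remaining]),
          mask ++ List.replicate (PySem.Chars.split₀ remaining).length 0)
  | fuel + 1 =>
    if PySem.Chars.isIn ['#'] remaining then
      let parts := PySem.Chars.splitOnMax remaining ['#'] 1
      let pre := parts.getD 0 []
      let rest := parts.getD 1 []
      let sentences := PySem.Chars.splitOnMax (PySem.Chars.strip rest) [' '] 1
      let frags' := frags ++ [PySem.Chars.strip pre]
      let mask' := mask ++ List.replicate (PySem.Chars.split₀ pre).length 0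
      if sentences.length == 1 then
        let tag := dividehashTag (sentences.getD 0 [])
        (PySem.Chars.join [' '] (frags' ++ [tag]),
         mask' ++ List.replicate (PySem.Chars.split₀ tag).length 1)
      else
        let parts2 := PySem.Chars.splitOnMax rest [' '] 1
        let tag := dividehashTag (parts2.getD 0 [])
        replcaeHashtagLoop fuel (frags' ++ [tag])
          (mask' ++ List.replicate (PySem.Chars.split₀ tag).length 1) (parts2.getD 1 [])
    else (PySem.Chars.join [' '] (frags ++ [PySem.Chars.strip remaining]),
          mask ++ List.replicate (PySem.Chars.split₀ remaining).length 0)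

def replcaeHashtag_alt (sentence : String) : String × List Int :=
  let r := replcaeHashtagLoop (sentence.toList.length + 1) [] [] sentence.toList
  (String.ofList r.1, r.2)

-- ===== PRECONDITION & SPEC =====
def Spec_replcaeHashtag (sentence : String) (out : String × List Int) : Prop := out = replcaeHashtag_alt sentence
instance (sentence : String) (out : String × List Int) : Decidable (Spec_replcaeHashtag sentence out) := by unfold Spec_replcaeHashtag; infer_instance

-- ===== CLAIM (what is proved, stated in full; the proofs are below) =====
def Claim_equal_replcaeHashtag : Prop := ∀ (sentence : String), Dom_replcaeHashtag sentence → Spec_replcaeHashtag sentence (replcaeHashtag sentence)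

-- ===== LEMMAS AND PROOFS =====

theorem join_cons_of_ne_nil (sep x : List Char) (l : List (List Char)) (h : l ≠ []) :
    PySem.Chars.join sep (x :: l) = x ++ sep ++ PySem.Chars.join sep l := by
  cases l with
  | nil => exact absurd rfl h
  | cons q rest => exact PySem.Chars.join_cons_cons sep x q rest

theorem join_two (xs : List (List Char)) (a b : List Char) :
    PySem.Chars.join [' '] (xs ++ [a, b]) = PySem.Chars.join [' '] (xs ++ [a ++ ' ' :: b]) := by
  induction xs with
  | nil =>
    simp only [List.nil_append]
    rw [PySem.Chars.join_cons_cons, PySem.Chars.join_singleton, PySem.Chars.join_singleton]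
    simp
  | cons x xs ih =>
    rw [List.cons_append, List.cons_append,
      join_cons_of_ne_nil [' '] x _ (by simp), join_cons_of_ne_nil [' '] x _ (by simp), ih]

theorem join_three (xs : List (List Char)) (a b c : List Char) :
    PySem.Chars.join [' '] (xs ++ [a, b, c]) =
      PySem.Chars.join [' '] (xs ++ [a ++ ' ' :: (b ++ ' ' :: c)]) := by
  rw [show xs ++ [a, b, c] = (xs ++ [a]) ++ [b, c] by simp, join_two,
    show (xs ++ [a]) ++ [b ++ ' ' :: c] = xs ++ [a, b ++ ' ' :: c] by simp, join_two]

theorem loop_eq_rec (fuel : Nat) (s : List Char) (frags : List (List Char)) (mask : List Int) :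
    replcaeHashtagLoop fuel frags mask s =
      (PySem.Chars.join [' '] (frags ++ [(replcaeHashtagRec fuel s).1]),
       mask ++ (replcaeHashtagRec fuel s).2) := by
  induction fuel generalizing s frags mask with
  | zero => simp only [replcaeHashtagLoop, replcaeHashtagRec]
  | succ fuel ih =>
    simp only [replcaeHashtagLoop, replcaeHashtagRec]
    by_cases h1 : PySem.Chars.isIn ['#'] s = true
    · simp only [h1, if_true]
      by_cases h2 :
          ((PySem.Chars.splitOnMax
            (PySem.Chars.strip ((PySem.Chars.splitOnMax s ['#'] 1).getD 1 [])) [' '] 1).length == 1) = true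
      · simp only [h2, if_true]
        simp only [List.append_assoc, List.singleton_append, List.getD_eq_getElem?_getD]
        rw [join_two]
      · simp only [Bool.not_eq_true] at h2
        simp only [h2, Bool.false_eq_true, if_false, ih]
        simp only [List.append_assoc, List.cons_append, List.nil_append,
          List.getD_eq_getElem?_getD]
        rw [join_three]
    · simp only [Bool.not_eq_true] at h1
      simp only [h1, Bool.false_eq_true, if_false]

-- ===== VERDICT (by name: the statement is the Claim_ definition above) =====
theorem replcaeHashtag_spec : Claim_equal_replcaeHashtag := by
  intro s _
  unfold Spec_replcaeHashtag replcaeHashtag replcaeHashtag_alt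
  rw [loop_eq_rec]
  simp [PySem.Chars.join_singleton]
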